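-- pv_equiv track=rewrite | github.com/Enzoonofre/Modelo_Booleano | modelo_booleano.py | processar_consulta
-- ===== SOURCE A (Python) =====
-- def contem_termo(texto, termo):
--     return termo in texto
--
-- def processar_consulta(consulta, textos):
--     termos = consulta.split()
--     resultados = []
--
--     resultados_atuais = set()
--     operador_atual = None
--
--     for termo in termos:
--         if termo == '&':
--             operador_atual = '&'
--         elif termo == '|':
--             operador_atual = '|'
--         elif termo.startswith('!'):
--             termo = termo[1:]
--             textos_filtrados = {i for i, texto in enumerate(textos) if not contem_termo(texto, termo)}
--             if operador_atual == '&':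
--                 resultados_atuais &= textos_filtrados
--             elif operador_atual == '|':
--                 resultados_atuais |= textos_filtrados
--             else:
--                 resultados_atuais = textos_filtrados
--             operador_atual = None
--         else:
--             textos_filtrados = {i for i, texto in enumerate(textos) if contem_termo(texto, termo)}
--             if operador_atual == '&':
--                 resultados_atuais &= textos_filtrados
--             elif operador_atual == '|':
--                 resultados_atuais |= textos_filtrados
--             else:
--                 resultados_atuais = textos_filtrados
--             operador_atual = None
--
--     return resultados_atuais
-- ===== SOURCE B (Python) =====
-- def processar_consulta(consulta, textos):
--     termos = consulta.split()
--     selecionados = set()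
--     for i, texto in enumerate(textos):
--         atual = False
--         operador = None
--         for termo in termos:
--             if termo == '&':
--                 operador = '&'
--             elif termo == '|':
--                 operador = '|'
--             else:
--                 if termo.startswith('!'):
--                     val = termo[1:] not in texto
--                 else:
--                     val = termo in texto
--                 if operador == '&':
--                     atual = atual and val
--                 elif operador == '|':
--                     atual = atual or val
--                 else:
--                     atual = val
--                 operador = None
--         if atual:
--             selecionados.add(i)
--     return selecionados
-- ===== Notes on version B (the rewrite author's own statement) =====
-- stated objective: alternative
-- what changed: B splits the query once and evaluates the boolean token stream per text with a single boolean accumulator, collecting matching indices in one pass, instead of A's building a whole index set per term and combining sets with &=/|=.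
import Mathlib
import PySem

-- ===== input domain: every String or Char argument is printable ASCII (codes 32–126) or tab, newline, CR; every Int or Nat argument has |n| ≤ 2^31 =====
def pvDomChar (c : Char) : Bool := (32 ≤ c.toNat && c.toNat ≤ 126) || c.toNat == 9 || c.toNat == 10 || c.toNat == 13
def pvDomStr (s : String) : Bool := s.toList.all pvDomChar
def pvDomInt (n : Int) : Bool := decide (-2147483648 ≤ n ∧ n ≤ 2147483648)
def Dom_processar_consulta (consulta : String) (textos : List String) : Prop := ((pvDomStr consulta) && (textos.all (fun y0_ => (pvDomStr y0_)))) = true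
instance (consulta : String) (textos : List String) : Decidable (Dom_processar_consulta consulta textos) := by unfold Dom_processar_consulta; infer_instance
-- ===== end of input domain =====

-- B evaluates the boolean query once per text (a per-text boolean accumulator) instead of
-- combining whole index sets per term; same return value (a set of indices), same cost class.

-- ===== PORT A =====
def contem_termo (texto : String) (termo : String) : Bool :=
  PySem.Str.isIn termo texto

-- one step of A's loop over the query tokens; state = (resultados_atuais, operador_atual).
-- Python's set iteration order is not modelled: the set resulting from '|=' is kept in its
-- canonical increasing representation (the return value is a set, compared as a finite set).
def pvStepA (textos : List String) (st : PySem.Set Int × Option String) (termo : String) :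
    PySem.Set Int × Option String :=
  if termo = "&" then (st.1, some "&")
  else if termo = "|" then (st.1, some "|")
  else if PySem.Str.startswith termo "!" then
    let t := PySem.Str.slice termo (some 1) none
    let filtrados : PySem.Set Int :=
      PySem.Set.ofList ((PySem.List.enumerate textos).filterMap
        (fun p => if !(contem_termo p.2 t) then some p.1 else none))
    if st.2 = some "&" then (PySem.Set.inter st.1 filtrados, none)
    else if st.2 = some "|" then
      (PySem.List.sorted (PySem.Set.union st.1 filtrados) (fun x => x) false, none)
    else (filtrados, none)
  else
    let filtrados : PySem.Set Int :=
      PySem.Set.ofList ((PySem.List.enumerate textos).filterMap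
        (fun p => if contem_termo p.2 termo then some p.1 else none))
    if st.2 = some "&" then (PySem.Set.inter st.1 filtrados, none)
    else if st.2 = some "|" then
      (PySem.List.sorted (PySem.Set.union st.1 filtrados) (fun x => x) false, none)
    else (filtrados, none)

def processar_consulta (consulta : String) (textos : List String) : List Int :=
  let termos := PySem.Str.split₀ consulta
  (termos.foldl (pvStepA textos) (PySem.Set.empty, none)).1

-- ===== PORT B =====
-- one step of B's inner loop over tokens for one text; state = (atual, operador)
def pvStepB (texto : String) (st : Bool × Option String) (termo : String) :
    Bool × Option String :=
  if termo = "&" then (st.1, some "&")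
  else if termo = "|" then (st.1, some "|")
  else
    let val := if PySem.Str.startswith termo "!" then
        !(PySem.Str.isIn (PySem.Str.slice termo (some 1) none) texto)
      else PySem.Str.isIn termo texto
    if st.2 = some "&" then (st.1 && val, none)
    else if st.2 = some "|" then (st.1 || val, none)
    else (val, none)

def processar_consulta_alt (consulta : String) (textos : List String) : List Int :=
  let termos := PySem.Str.split₀ consulta
  (PySem.List.enumerate textos).foldl
    (fun (sel : PySem.Set Int) p =>
      if (termos.foldl (pvStepB p.2) (false, none)).1 then PySem.Set.add sel p.1 else sel)
    PySem.Set.empty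

-- ===== PRECONDITION & SPEC =====
def Spec_processar_consulta (consulta : String) (textos : List String) (out : List Int) : Prop := out = processar_consulta_alt consulta textos
instance (consulta : String) (textos : List String) (out : List Int) : Decidable (Spec_processar_consulta consulta textos out) := by unfold Spec_processar_consulta; infer_instance

-- ===== CLAIM (what is proved, stated in full; the proofs are below) =====
def Claim_equal_processar_consulta : Prop := ∀ (consulta : String) (textos : List String), Dom_processar_consulta consulta textos → Spec_processar_consulta consulta textos (processar_consulta consulta textos)

-- ===== LEMMAS AND PROOFS =====

-- the increasing list of indices whose text satisfies F
def eFilter (textos : List String) (F : String → Bool) : List Int :=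
  (PySem.List.enumerate textos).filterMap (fun p => if F p.2 then some p.1 else none)

theorem eFilter_pairwise (textos : List String) (F : String → Bool) :
    (eFilter textos F).Pairwise (· < ·) := by
  unfold eFilter
  refine List.Pairwise.filterMap _ ?_ (PySem.List.pairwise_lt_enumerate textos 0)
  intro a a' h b hb b' hb'
  split at hb <;> simp_all

theorem eFilter_nodup (textos : List String) (F : String → Bool) :
    (eFilter textos F).Nodup := (eFilter_pairwise textos F).imp (fun h => ne_of_lt h)

theorem mem_eFilter (textos : List String) (F : String → Bool) (i : Int) :
    i ∈ eFilter textos F ↔ ∃ (k : Nat) (h : k < textos.length), i = (k : Int) ∧ F textos[k] = true := by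
  unfold eFilter
  rw [List.mem_filterMap]
  constructor
  · rintro ⟨p, hp, hif⟩
    rcases (PySem.List.mem_enumerate_iff textos 0 p).mp hp with ⟨k, hk, rfl⟩
    refine ⟨k, hk, ?_⟩
    by_cases hF : F textos[k] = true
    · simp [hF] at hif ⊢; omega
    · simp [hF] at hif
  · rintro ⟨k, hk, rfl, hF⟩
    refine ⟨((0 : Int) + k, textos[k]), ?_, ?_⟩
    · exact (PySem.List.mem_enumerate_iff textos 0 _).mpr ⟨k, hk, rfl⟩
    · simp [hF]

theorem eFilter_false (textos : List String) :
    eFilter textos (fun _ => false) = [] := by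
  unfold eFilter
  simp

-- two strictly increasing Int lists with the same members are equal
theorem eq_of_lt_lt (l₁ l₂ : List Int) (h₁ : l₁.Pairwise (· < ·)) (h₂ : l₂.Pairwise (· < ·))
    (hm : ∀ x, x ∈ l₁ ↔ x ∈ l₂) : l₁ = l₂ := by
  have n₁ : l₁.Nodup := h₁.imp (fun h => ne_of_lt h)
  have n₂ : l₂.Nodup := h₂.imp (fun h => ne_of_lt h)
  exact List.Perm.eq_of_pairwise (fun a b _ _ hab hba => absurd hba (not_lt_of_gt hab))
    h₁ h₂ ((List.perm_ext_iff_of_nodup n₁ n₂).mpr hm)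

theorem inter_sublist (s t : List Int) : (PySem.Set.inter s t).Sublist s := by
  simp only [PySem.Set.inter]
  exact List.filter_sublist

theorem inter_eFilter (textos : List String) (F Q : String → Bool) :
    PySem.Set.inter (eFilter textos F) (eFilter textos Q)
      = eFilter textos (fun t => F t && Q t) := by
  refine eq_of_lt_lt _ _ ((eFilter_pairwise textos F).sublist (inter_sublist _ _))
    (eFilter_pairwise textos _) (fun x => ?_)
  rw [PySem.Set.mem_inter, mem_eFilter, mem_eFilter, mem_eFilter]
  constructor
  · rintro ⟨⟨k, hk, hik, hF⟩, ⟨k', hk', hik', hQ⟩⟩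
    have hkk : k = k' := by omega
    subst hkk
    exact ⟨k, hk, hik, by simp [hF, hQ]⟩
  · rintro ⟨k, hk, rfl, hFQ⟩
    rw [Bool.and_eq_true] at hFQ
    exact ⟨⟨k, hk, rfl, hFQ.1⟩, ⟨k, hk, rfl, hFQ.2⟩⟩

theorem union_eFilter (textos : List String) (F Q : String → Bool) :
    PySem.List.sorted (PySem.Set.union (eFilter textos F) (eFilter textos Q)) (fun x => x) false
      = eFilter textos (fun t => F t || Q t) := by
  refine PySem.List.sorted_eq_of_perm_of_pairwise_lt _ _ _ ?_ ?_
  · refine (List.perm_ext_iff_of_nodup (eFilter_nodup textos _)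
      (PySem.Set.nodup_union _ _ (eFilter_nodup textos F))).mpr (fun x => ?_)
    rw [PySem.Set.mem_union, mem_eFilter, mem_eFilter, mem_eFilter]
    constructor
    · rintro ⟨k, hk, rfl, hFQ⟩
      rw [Bool.or_eq_true] at hFQ
      rcases hFQ with h | h
      · exact Or.inl ⟨k, hk, rfl, h⟩
      · exact Or.inr ⟨k, hk, rfl, h⟩
    · rintro (⟨k, hk, rfl, h⟩ | ⟨k, hk, rfl, h⟩)
      · exact ⟨k, hk, rfl, by simp [h]⟩
      · exact ⟨k, hk, rfl, by simp [h]⟩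
  · exact eFilter_pairwise textos _

theorem master (textos : List String) (termos : List String) (F : String → Bool) (op : Option String) :
    (termos.foldl (pvStepA textos) (eFilter textos F, op)).1
      = eFilter textos (fun t => (termos.foldl (pvStepB t) (F t, op)).1) := by
  induction termos generalizing F op with
  | nil => simp
  | cons termo ts ih =>
    simp only [List.foldl_cons]
    by_cases h1 : termo = "&"
    · have hA : pvStepA textos (eFilter textos F, op) termo = (eFilter textos F, some "&") := by
        simp [pvStepA, h1]
      have hB : ∀ t, pvStepB t (F t, op) termo = (F t, some "&") := fun t => by
        simp [pvStepB, h1]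
      rw [hA]
      simp only [hB]
      exact ih F (some "&")
    · by_cases h2 : termo = "|"
      · have hA : pvStepA textos (eFilter textos F, op) termo = (eFilter textos F, some "|") := by
          simp [pvStepA, h2]
        have hB : ∀ t, pvStepB t (F t, op) termo = (F t, some "|") := fun t => by
          simp [pvStepB, h2]
        rw [hA]
        simp only [hB]
        exact ih F (some "|")
      · -- a term token: its per-text truth value
        set Q : String → Bool := fun t =>
          if PySem.Str.startswith termo "!" then
            !(PySem.Str.isIn (PySem.Str.slice termo (some 1) none) t)
          else PySem.Str.isIn termo t with hQ
        -- the comprehension builds exactly eFilter textos Q (as a set: it is already Nodup)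
        have hfilt : ∀ (b : Bool), b = PySem.Str.startswith termo "!" →
            pvStepA textos (eFilter textos F, op) termo
              = (if op = some "&" then PySem.Set.inter (eFilter textos F) (eFilter textos Q)
                 else if op = some "|" then
                   PySem.List.sorted (PySem.Set.union (eFilter textos F) (eFilter textos Q)) (fun x => x) false
                 else eFilter textos Q, none) := by
          intro b hb
          cases b with
          | true =>
            have hofl : PySem.Set.ofList (eFilter textos Q) = eFilter textos Q :=
              PySem.Set.ofList_eq_self_of_nodup _ (eFilter_nodup textos Q)
            simp only [pvStepA, if_neg h1, if_neg h2, if_pos hb.symm]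
            have : (fun (p : Int × String) =>
                if !(contem_termo p.2 (PySem.Str.slice termo (some 1) none)) then some p.1 else none)
                = (fun (p : Int × String) => if Q p.2 then some p.1 else none) := by
              funext p
              rw [hQ, ← hb]
              simp [contem_termo]
            rw [show ((PySem.List.enumerate textos).filterMap (fun p =>
                if !(contem_termo p.2 (PySem.Str.slice termo (some 1) none)) then some p.1 else none))
                = eFilter textos Q by rw [this]; rfl]
            rw [hofl]
            split_ifs <;> rfl
          | false =>
            have hofl : PySem.Set.ofList (eFilter textos Q) = eFilter textos Q :=
              PySem.Set.ofList_eq_self_of_nodup _ (eFilter_nodup textos Q)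
            simp only [pvStepA, if_neg h1, if_neg h2, if_neg (by rw [← hb]; simp : ¬ PySem.Str.startswith termo "!" = true)]
            have : (fun (p : Int × String) => if contem_termo p.2 termo then some p.1 else none)
                = (fun (p : Int × String) => if Q p.2 then some p.1 else none) := by
              funext p
              rw [hQ, ← hb]
              simp [contem_termo]
            rw [show ((PySem.List.enumerate textos).filterMap (fun p =>
                if contem_termo p.2 termo then some p.1 else none)) = eFilter textos Q by rw [this]; rfl]
            rw [hofl]
            split_ifs <;> rfl
        have hB : ∀ t, pvStepB t (F t, op) termo
            = ((if op = some "&" then F t && Q t else if op = some "|" then F t || Q t else Q t), none) := by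
          intro t
          simp only [pvStepB, if_neg h1, if_neg h2, hQ]
          split_ifs <;> rfl
        rw [hfilt (PySem.Str.startswith termo "!") rfl]
        simp only [hB]
        by_cases hop1 : op = some "&"
        · simp only [if_pos hop1, inter_eFilter]
          exact ih _ none
        · by_cases hop2 : op = some "|"
          · simp only [if_neg hop1, if_pos hop2, union_eFilter]
            exact ih _ none
          · simp only [if_neg hop1, if_neg hop2]
            exact ih _ none

theorem foldl_add_eFilter (textos : List String) (c : String → Bool) (s : Int) (acc : List Int)
    (hacc : ∀ x ∈ acc, x < s) :
    (PySem.List.enumerate textos s).foldl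
        (fun sel p => if c p.2 then PySem.Set.add sel p.1 else sel) acc
      = acc ++ (PySem.List.enumerate textos s).filterMap (fun p => if c p.2 then some p.1 else none) := by
  induction textos generalizing s acc with
  | nil => simp [PySem.List.enumerate_nil]
  | cons x xs ih =>
    rw [PySem.List.enumerate_cons]
    by_cases hc : c x = true
    · have hadd : PySem.Set.add acc s = acc ++ [s] :=
        PySem.Set.add_of_not_mem (fun hmem => absurd (hacc s hmem) (lt_irrefl s))
      simp only [List.foldl_cons, List.filterMap_cons, hc, if_pos trivial, hadd]
      rw [ih (s + 1) (acc ++ [s]) (by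
        intro y hy
        rcases List.mem_append.mp hy with h | h
        · exact lt_trans (hacc y h) (by omega)
        · simp at h; omega)]
      simp
    · simp only [List.foldl_cons, List.filterMap_cons, hc]
      exact ih (s + 1) acc (fun y hy => lt_trans (hacc y hy) (by omega))

theorem alt_eq_eFilter (consulta : String) (textos : List String) :
    processar_consulta_alt consulta textos
      = eFilter textos (fun t => ((PySem.Str.split₀ consulta).foldl (pvStepB t) (false, none)).1) := by
  unfold processar_consulta_alt eFilter
  rw [foldl_add_eFilter textos
    (fun t => ((PySem.Str.split₀ consulta).foldl (pvStepB t) (false, none)).1) 0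
    PySem.Set.empty (by intro x hx; simp [PySem.Set.empty] at hx)]
  rfl

-- ===== VERDICT (by name: the statement is the Claim_ definition above) =====
theorem processar_consulta_spec : Claim_equal_processar_consulta := by
  intro consulta textos _
  unfold Spec_processar_consulta processar_consulta
  rw [alt_eq_eFilter]
  have h0 : (PySem.Set.empty : PySem.Set Int) = eFilter textos (fun _ => false) :=
    (eFilter_false textos).symm
  rw [h0, master]
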